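-- pv_equiv track=rewrite | github.com/AdemHodzic/python-learning | Day #3/language.py | is_misspelled
-- ===== SOURCE A (Python) =====
-- def is_misspelled(word:str) -> bool:
--     #Define vowels
--     vowels = ['a','e','i','o','u']
--     #Check if word is empy string
--     if len(word) == 0:
--         return False
--     #Check if word is only a vowel
--     if len(word) == 1 and word in vowels:
--         return False
--     #Check if differnce in number of vowels and non-vowels is less or equal to 1
--     vowels_list = list(filter(lambda x: x in vowels, list(word)))
--     non_vowels_list = list(filter(lambda x: x not in vowels, list(word)))
--     if abs(len(vowels_list) - len(non_vowels_list)) > 1: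
--         return True
--     #Check if word starts with vowel and if it does it's len must be an odd number
--     word_list = list(word)
--     #If first char is vowel, the second one must be non vowel
--     if word_list[0] in vowels:
--         if len(word_list) % 2 == 0:
--             return True
--         #In this case every odd index should be non vowel
--         for i in range(0, len(word)):
--             if not i % 2 == 0:
--                 if word_list[i] in vowels:
--                     return True
--             elif i % 2 == 0:
--                 if not word_list[i] in vowels:
--                     return True
--     elif not word_list[0] in vowels:
--         if not len(word_list) % 2 == 0:
--             return True
--         for i in range(0, len(word)):
--             if not i % 2 == 0:
--                 if not word_list[i] in vowels:
--                     return True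
--             elif i % 2 == 0:
--                 if  word_list[i] in vowels:
--                     return True
--     return False
-- ===== SOURCE B (Python) =====
-- def is_misspelled(word: str) -> bool:
--     if not word:
--         return False
--     vowels = 'aeiou'
--     if word[-1] not in vowels:
--         return True
--     for i in range(len(word) - 1):
--         if (word[i] in vowels) == (word[i + 1] in vowels):
--             return True
--     return False
-- ===== Notes on version B (the rewrite author's own statement) =====
-- stated objective: simpler
-- what changed: Replaces A's vowel/consonant counting passes and its two start-class-dependent parity loops with the predicate they implement: misspelled unless the word ends in a vowel and adjacent characters strictly alternate vowel/consonant, checked by one O(1) last-char test plus a single short-circuiting adjacent-pair scan.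
import Mathlib
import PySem

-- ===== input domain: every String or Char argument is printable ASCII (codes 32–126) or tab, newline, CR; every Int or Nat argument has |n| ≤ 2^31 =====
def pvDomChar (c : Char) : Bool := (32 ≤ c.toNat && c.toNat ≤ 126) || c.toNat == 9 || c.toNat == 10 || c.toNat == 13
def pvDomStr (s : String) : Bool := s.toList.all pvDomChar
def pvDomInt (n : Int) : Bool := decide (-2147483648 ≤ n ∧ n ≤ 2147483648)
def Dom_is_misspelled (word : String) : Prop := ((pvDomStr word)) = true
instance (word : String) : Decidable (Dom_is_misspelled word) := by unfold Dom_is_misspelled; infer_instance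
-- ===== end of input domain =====

-- B drops A's redundant vowel/consonant-count pass and the two start-dependent parity
-- loops: it just checks the last char is a vowel and scans adjacent pairs once (simpler).

-- ===== PORT A =====
-- x in vowels (a char of word against the list of one-char strings)
def pvIsV (c : Char) : Bool := (['a', 'e', 'i', 'o', 'u'] : List Char).contains c

-- the for-loop in the vowel-start branch (any i: odd index vowel / even index non-vowel → True)
def pvLoopV (wl : List Char) : Bool :=
  (List.range wl.length).any fun i =>
    if i % 2 ≠ 0 then pvIsV (wl.getD i ' ')
    else if i % 2 = 0 then !pvIsV (wl.getD i ' ')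
    else false

-- the for-loop in the consonant-start branch
def pvLoopC (wl : List Char) : Bool :=
  (List.range wl.length).any fun i =>
    if i % 2 ≠ 0 then !pvIsV (wl.getD i ' ')
    else if i % 2 = 0 then pvIsV (wl.getD i ' ')
    else false

def is_misspelled (word : String) : Bool :=
  let wl := word.toList
  if wl.length = 0 then false
  else if wl.length = 1 ∧ (["a", "e", "i", "o", "u"] : List String).contains word then false
  else
    let vowels_list := wl.filter fun x => pvIsV x
    let non_vowels_list := wl.filter fun x => !pvIsV x
    if ((vowels_list.length : Int) - (non_vowels_list.length : Int)).natAbs > 1 then true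
    else if pvIsV (wl.getD 0 ' ') then
      if wl.length % 2 = 0 then true else pvLoopV wl
    else
      if wl.length % 2 ≠ 0 then true else pvLoopC wl

-- ===== PORT B =====
-- c in 'aeiou'
def pvIsVowelB (c : Char) : Bool := "aeiou".toList.contains c

def is_misspelled_alt (word : String) : Bool :=
  let wl := word.toList
  if wl.isEmpty then false
  else if !pvIsVowelB (wl.getD (wl.length - 1) ' ') then true  -- word[-1], index len-1
  else (List.range (wl.length - 1)).any fun i =>
    pvIsVowelB (wl.getD i ' ') == pvIsVowelB (wl.getD (i + 1) ' ')

-- ===== PRECONDITION & SPEC =====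
def Spec_is_misspelled (word : String) (out : Bool) : Prop := out = is_misspelled_alt word
instance (word : String) (out : Bool) : Decidable (Spec_is_misspelled word out) := by unfold Spec_is_misspelled; infer_instance

-- ===== CLAIM (what is proved, stated in full; the proofs are below) =====
def Claim_equal_is_misspelled : Prop := ∀ (word : String), Dom_is_misspelled word → Spec_is_misspelled word (is_misspelled word)

-- ===== LEMMAS AND PROOFS =====

-- expected vowel-class of index i when index 0 has class b and classes alternate
def pvPar (i : Nat) (b : Bool) : Bool := if i % 2 = 0 then b else !b

theorem pvPar_succ (i : Nat) (b : Bool) : pvPar (i + 1) b = pvPar i (!b) := by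
  by_cases h : i % 2 = 0 <;> simp [pvPar, h, Nat.succ_mod_two_eq_zero_iff]

theorem pvPar_not (i : Nat) (b : Bool) : pvPar i (!b) = !pvPar i b := by
  by_cases h : i % 2 = 0 <;> simp [pvPar, h]

-- "the classes of wl alternate starting with class b", index form
def pvIdx (b : Bool) (wl : List Char) : Prop :=
  ∀ i, i < wl.length → pvIsV (wl.getD i ' ') = pvPar i b

-- recursive form of the same predicate
def pvAlt (b : Bool) : List Char → Bool
  | [] => true
  | c :: cs => (pvIsV c == b) && pvAlt (!b) cs

theorem pvAlt_iff (wl : List Char) : ∀ b, pvAlt b wl = true ↔ pvIdx b wl := by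
  induction wl with
  | nil => intro b; simp [pvAlt, pvIdx]
  | cons c cs ih =>
    intro b
    constructor
    · intro h i hi
      simp [pvAlt] at h
      match i with
      | 0 => simpa [pvPar] using h.1
      | j + 1 =>
        have := (ih (!b)).mp (by simp [h.2]) j (by simpa using hi)
        simpa [pvPar_succ] using this
    · intro h
      simp [pvAlt]
      refine ⟨by simpa [pvPar] using h 0 (by simp), (ih (!b)).mpr ?_⟩
      intro j hj
      have := h (j + 1) (by simpa using Nat.succ_lt_succ hj)
      simpa [pvPar_succ] using this

theorem pvLoopV_false_iff (wl : List Char) : pvLoopV wl = false ↔ pvIdx true wl := by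
  simp only [pvLoopV, List.any_eq_false, List.mem_range, pvIdx]
  constructor
  · intro h i hi
    have := h i hi
    by_cases hp : i % 2 = 0 <;> simp [hp, pvPar] at this ⊢ <;> simp [this]
  · intro h i hi
    have := h i hi
    by_cases hp : i % 2 = 0 <;> simp [hp, pvPar] at this ⊢ <;> simp [this]

theorem pvLoopC_false_iff (wl : List Char) : pvLoopC wl = false ↔ pvIdx false wl := by
  simp only [pvLoopC, List.any_eq_false, List.mem_range, pvIdx]
  constructor
  · intro h i hi
    have := h i hi
    by_cases hp : i % 2 = 0 <;> simp [hp, pvPar] at this ⊢ <;> simp [this]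
  · intro h i hi
    have := h i hi
    by_cases hp : i % 2 = 0 <;> simp [hp, pvPar] at this ⊢ <;> simp [this]

-- B's pair scan returns false iff adjacent classes all differ
theorem pvPairs_false_iff (wl : List Char) :
    ((List.range (wl.length - 1)).any fun i =>
      pvIsV (wl.getD i ' ') == pvIsV (wl.getD (i + 1) ' ')) = false ↔
    ∀ i, i < wl.length - 1 → pvIsV (wl.getD i ' ') = !pvIsV (wl.getD (i + 1) ' ') := by
  simp only [List.any_eq_false, List.mem_range]
  constructor
  · intro h i hi
    have := h i hi
    revert this
    cases pvIsV (wl.getD i ' ') <;> cases pvIsV (wl.getD (i + 1) ' ') <;> simp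
  · intro h i hi
    have := h i hi
    revert this
    cases pvIsV (wl.getD i ' ') <;> cases pvIsV (wl.getD (i + 1) ' ') <;> simp

-- adjacent-differences + the head class determine the whole index pattern
theorem pvDiff_iff_idx (wl : List Char) (hne : wl ≠ []) :
    (∀ i, i < wl.length - 1 → pvIsV (wl.getD i ' ') = !pvIsV (wl.getD (i + 1) ' ')) ↔
    pvIdx (pvIsV (wl.getD 0 ' ')) wl := by
  have hlen : 0 < wl.length := List.length_pos_of_ne_nil hne
  constructor
  · intro h
    intro i
    induction i with
    | zero => intro _; simp [pvPar]
    | succ j ih =>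
      intro hj
      have hj' : j < wl.length := by omega
      have h1 := ih hj'
      have h2 := h j (by omega)
      rw [h1] at h2
      have h3 : pvIsV (wl.getD (j + 1) ' ') = !pvPar j (pvIsV (wl.getD 0 ' ')) := by
        rw [h2, Bool.not_not]
      rw [h3, pvPar_succ, pvPar_not]
  · intro h i hi
    have h1 := h i (by omega)
    have h2 := h (i + 1) (by omega)
    rw [h1, h2, pvPar_succ, pvPar_not, Bool.not_not]

-- vowel count under alternation (doubled to stay in Nat)
theorem pvAlt_count (wl : List Char) : ∀ b, pvAlt b wl = true →
    2 * (wl.filter fun x => pvIsV x).length + (if b then 0 else wl.length % 2) =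
      wl.length + (if b then wl.length % 2 else 0) := by
  induction wl with
  | nil => intro b _; cases b <;> simp
  | cons c cs ih =>
    intro b hb
    simp only [pvAlt, Bool.and_eq_true, beq_iff_eq] at hb
    have h2 := ih (!b) hb.2
    have hf : (List.filter (fun x => pvIsV x) (c :: cs)).length =
        (List.filter (fun x => pvIsV x) cs).length + (if b = true then 1 else 0) := by
      cases b <;> simp [List.filter_cons, hb.1]
    rw [hf]
    cases b <;>
      simp only [Bool.not_true, Bool.not_false, if_true, if_false, Bool.true_eq_false,
        Bool.false_eq_true, List.length_cons, reduceIte] at h2 ⊢ <;> omega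

theorem pvFilter_split (wl : List Char) :
    (wl.filter fun x => pvIsV x).length + (wl.filter fun x => !pvIsV x).length = wl.length := by
  induction wl with
  | nil => simp
  | cons c cs ih => cases h : pvIsV c <;> simp [List.filter_cons, h] <;> omega

-- the two vowel tests agree
theorem pvIsVowelB_eq (c : Char) : pvIsVowelB c = pvIsV c := rfl

-- 'word in ["a","e","i","o","u"]' for a one-char word is the char test
theorem pvMem_strings (word : String) (c : Char) (h : word.toList = [c]) :
    (["a", "e", "i", "o", "u"] : List String).contains word = pvIsV c := by
  have hw : ∀ s : String, (word = s) ↔ ([c] = s.toList) := by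
    intro s; rw [← h, String.toList_inj]
  simp only [List.contains_eq_mem, List.mem_cons, List.not_mem_nil, or_false, pvIsV]
  simp only [hw]
  simp [List.cons_eq_cons]

-- characterization of B = false on a nonempty word
theorem pvB_char (word : String) (h : word.toList ≠ []) :
    is_misspelled_alt word = false ↔
      (pvIsV (word.toList.getD (word.toList.length - 1) ' ') = true ∧
        pvIdx (pvIsV (word.toList.getD 0 ' ')) word.toList) := by
  have hie : word.toList.isEmpty = false := by simpa [List.isEmpty_iff] using h
  simp only [is_misspelled_alt, hie, Bool.false_eq_true, if_false, pvIsVowelB_eq]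
  by_cases hl : pvIsV (word.toList.getD (word.toList.length - 1) ' ') = true
  · rw [hl]
    simp only [Bool.not_true, Bool.false_eq_true, if_false]
    rw [pvPairs_false_iff, pvDiff_iff_idx word.toList h]
    simp [hl]
  · simp only [Bool.not_eq_true] at hl
    rw [hl]
    simp

-- characterization of A = false on a nonempty word
theorem pvA_char (word : String) (h : word.toList ≠ []) :
    is_misspelled word = false ↔
      ((word.toList.length = 1 ∧ (["a", "e", "i", "o", "u"] : List String).contains word) ∨
        (¬ (((word.toList.filter fun x => pvIsV x).length : Int) -
             ((word.toList.filter fun x => !pvIsV x).length : Int)).natAbs > 1 ∧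
          (if pvIsV (word.toList.getD 0 ' ') = true then
             word.toList.length % 2 = 1 ∧ pvIdx true word.toList
           else word.toList.length % 2 = 0 ∧ pvIdx false word.toList))) := by
  have hlen : 0 < word.toList.length := List.length_pos_of_ne_nil h
  simp only [is_misspelled]
  rw [if_neg (by omega)]
  by_cases h1 : word.toList.length = 1 ∧ (["a", "e", "i", "o", "u"] : List String).contains word
  · rw [if_pos h1]
    exact ⟨fun _ => Or.inl h1, fun _ => rfl⟩
  · rw [if_neg h1]
    by_cases hcnt : (((word.toList.filter fun x => pvIsV x).length : Int) -
        ((word.toList.filter fun x => !pvIsV x).length : Int)).natAbs > 1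
    · rw [if_pos hcnt]
      simp only [Bool.true_eq_false, false_iff]
      rintro (hx | ⟨hx, -⟩)
      · exact h1 hx
      · exact hx hcnt
    · rw [if_neg hcnt]
      by_cases hb : pvIsV (word.toList.getD 0 ' ') = true
      · rw [if_pos hb, if_pos hb]
        by_cases hpar : word.toList.length % 2 = 0
        · rw [if_pos hpar]
          simp only [Bool.true_eq_false, false_iff]
          rintro (hx | ⟨-, hx, -⟩)
          · exact h1 hx
          · omega
        · rw [if_neg hpar]
          rw [← Bool.not_eq_true, Bool.not_eq_true, pvLoopV_false_iff]
          constructor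
          · intro hl; exact Or.inr ⟨hcnt, by omega, hl⟩
          · rintro ((⟨_, _⟩) | ⟨_, _, hl⟩)
            · exact absurd ⟨‹_›, ‹_›⟩ h1
            · exact hl
      · rw [if_neg hb, if_neg hb]
        by_cases hpar : word.toList.length % 2 = 0
        · rw [if_neg (by omega)]
          rw [← Bool.not_eq_true, Bool.not_eq_true, pvLoopC_false_iff]
          constructor
          · intro hl; exact Or.inr ⟨hcnt, hpar, hl⟩
          · rintro ((⟨_, _⟩) | ⟨_, _, hl⟩)
            · exact absurd ⟨‹_›, ‹_›⟩ h1
            · exact hl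
        · rw [if_pos (by omega)]
          simp only [Bool.true_eq_false, false_iff]
          rintro (hx | ⟨-, hx, -⟩)
          · exact h1 hx
          · omega

-- main equivalence
theorem pv_main (word : String) : is_misspelled word = is_misspelled_alt word := by
  by_cases hnil : word.toList = []
  · simp [is_misspelled, is_misspelled_alt, hnil]
  · have hlen : 0 < word.toList.length := List.length_pos_of_ne_nil hnil
    have key : is_misspelled word = false ↔ is_misspelled_alt word = false := by
      rw [pvA_char word hnil, pvB_char word hnil]
      constructor
      · rintro (⟨hl1, hmem⟩ | ⟨hcnt, hbr⟩)
        · -- one-char vowel word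
          obtain ⟨c, hc⟩ : ∃ c, word.toList = [c] := by
            rcases hx : word.toList with _ | ⟨c, cs⟩
            · exact absurd hx hnil
            · refine ⟨c, ?_⟩
              rw [hx] at hl1
              simp only [List.length_cons] at hl1
              have hcs : cs = [] := List.length_eq_zero_iff.mp (by omega)
              rw [hcs]
          have hcv : pvIsV c = true := by
            rw [pvMem_strings word c hc] at hmem; exact hmem
          rw [hc]
          refine ⟨by simpa using hcv, ?_⟩
          intro i hi
          simp at hi
          subst hi
          simpa [pvPar] using hcv
        · by_cases hb : pvIsV (word.toList.getD 0 ' ') = true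
          · rw [if_pos hb] at hbr
            obtain ⟨hodd, hidx⟩ := hbr
            have hlast := hidx (word.toList.length - 1) (by omega)
            refine ⟨?_, by rw [hb]; exact hidx⟩
            rw [hlast]
            have hp : (word.toList.length - 1) % 2 = 0 := by omega
            simp only [pvPar]
            rw [if_pos hp]
          · rw [if_neg hb] at hbr
            obtain ⟨heven, hidx⟩ := hbr
            have hlast := hidx (word.toList.length - 1) (by omega)
            refine ⟨?_, by simp only [Bool.not_eq_true] at hb; rw [hb]; exact hidx⟩
            rw [hlast]
            have hp : (word.toList.length - 1) % 2 = 1 := by omega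
            simp only [pvPar]
            rw [if_neg (by omega)]
            rfl
      · rintro ⟨hlast, hidx⟩
        have halt : pvAlt (pvIsV (word.toList.getD 0 ' ')) word.toList = true :=
          (pvAlt_iff word.toList _).mpr hidx
        have hcount := pvAlt_count word.toList _ halt
        have hsplit := pvFilter_split word.toList
        have hlast' := hidx (word.toList.length - 1) (by omega)
        rw [hlast'] at hlast
        right
        by_cases hb : pvIsV (word.toList.getD 0 ' ') = true
        · rw [hb] at hcount hlast
          simp only [reduceIte] at hcount
          refine ⟨by omega, ?_⟩
          rw [if_pos hb]
          refine ⟨?_, by rw [hb] at hidx; exact hidx⟩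
          have hp : (word.toList.length - 1) % 2 = 0 := by
            by_contra h2
            unfold pvPar at hlast
            rw [if_neg h2] at hlast
            exact absurd hlast (by simp)
          omega
        · simp only [Bool.not_eq_true] at hb
          rw [hb] at hcount hlast
          simp only [Bool.false_eq_true, reduceIte] at hcount
          refine ⟨by omega, ?_⟩
          rw [if_neg (by rw [hb]; exact Bool.false_ne_true)]
          refine ⟨?_, by rw [hb] at hidx; exact hidx⟩
          have hp : (word.toList.length - 1) % 2 = 1 := by
            by_contra h2
            have h3 : (word.toList.length - 1) % 2 = 0 := by omega
            unfold pvPar at hlast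
            rw [if_pos h3] at hlast
            exact absurd hlast (by simp)
          omega
    cases hAv : is_misspelled word <;> cases hBv : is_misspelled_alt word <;> simp_all

-- ===== VERDICT (by name: the statement is the Claim_ definition above) =====
theorem is_misspelled_spec : Claim_equal_is_misspelled := by
  intro word _
  unfold Spec_is_misspelled
  exact pv_main word
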